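-- pv_equiv track=rewrite | github.com/zhenyu/interviewPractice | python/hrt_concat_num.py | count_concat_num
-- ===== SOURCE A (Python) =====
-- def count_concat_num(numbers, value):
--     m = {}
--     ret =0
--     for n in numbers:
--         count = m.get(str(n), 0) +1
--         m[str(n)] = count
--     v_str = str(value)
--     for n in numbers:
--         ns = str(n)
--         if v_str.startswith(ns):
--             ret+=m.get(v_str[len(ns):],0)
--     return ret
-- ===== SOURCE B (Python) =====
-- def count_concat_num(numbers, value):
--     m = {}
--     for n in numbers:
--         s = str(n)
--         m[s] = m.get(s, 0) + 1
--     v_str = str(value)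
--     ret = 0
--     for i in range(1, len(v_str)):
--         ret += m.get(v_str[:i], 0) * m.get(v_str[i:], 0)
--     return ret
-- ===== Notes on version B (the rewrite author's own statement) =====
-- stated objective: alternative
-- what changed: The second pass over all numbers (testing each str(n) as a prefix of str(value)) is replaced by a loop over the split points of str(value), adding the product of the two frequency-map lookups at each split.
import Mathlib
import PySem

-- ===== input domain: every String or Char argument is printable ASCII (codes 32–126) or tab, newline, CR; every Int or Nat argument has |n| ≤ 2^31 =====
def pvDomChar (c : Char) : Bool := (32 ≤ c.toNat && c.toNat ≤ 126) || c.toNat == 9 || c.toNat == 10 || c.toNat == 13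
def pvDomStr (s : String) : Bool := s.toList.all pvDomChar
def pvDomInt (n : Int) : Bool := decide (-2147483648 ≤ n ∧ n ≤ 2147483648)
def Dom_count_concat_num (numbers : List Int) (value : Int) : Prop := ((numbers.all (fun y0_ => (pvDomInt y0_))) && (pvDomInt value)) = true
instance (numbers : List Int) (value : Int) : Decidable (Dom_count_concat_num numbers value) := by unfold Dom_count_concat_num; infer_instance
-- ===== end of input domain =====

-- B replaces A's second scan over all numbers by a scan over the split points of str(value),
-- multiplying the two frequency-map lookups at each split (objective: alternative algorithm).

-- ===== PORT A =====
def count_concat_num (numbers : List Int) (value : Int) : Int :=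
  let m := numbers.foldl (fun d n =>
    let count := d.getD (PySem.Int.toChars n) 0 + 1
    d.insert (PySem.Int.toChars n) count) PySem.Dict.empty
  let vStr := PySem.Int.toChars value
  numbers.foldl (fun ret n =>
    let ns := PySem.Int.toChars n
    if PySem.Chars.startswith vStr ns then
      ret + m.getD (PySem.Chars.slice vStr (some (PySem.Chars.len ns)) none) 0
    else ret) 0

-- ===== PORT B =====
def count_concat_num_alt (numbers : List Int) (value : Int) : Int :=
  let m := numbers.foldl (fun d n =>
    let s := PySem.Int.toChars n
    d.insert s (d.getD s 0 + 1)) PySem.Dict.empty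
  let vStr := PySem.Int.toChars value
  (PySem.List.pyRange 1 (PySem.Chars.len vStr)).foldl (fun ret i =>
    ret + m.getD (PySem.Chars.slice vStr none (some i)) 0
            * m.getD (PySem.Chars.slice vStr (some i) none) 0) 0

-- ===== PRECONDITION & SPEC =====
def Spec_count_concat_num (numbers : List Int) (value : Int) (out : Int) : Prop := out = count_concat_num_alt numbers value
instance (numbers : List Int) (value : Int) (out : Int) : Decidable (Spec_count_concat_num numbers value out) := by unfold Spec_count_concat_num; infer_instance

-- ===== CLAIM (what is proved, stated in full; the proofs are below) =====
def Claim_equal_count_concat_num : Prop := ∀ (numbers : List Int) (value : Int), Dom_count_concat_num numbers value → Spec_count_concat_num numbers value (count_concat_num numbers value)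

-- ===== LEMMAS AND PROOFS =====

-- str(n) is never the empty string
theorem pvToChars_ne_nil (n : Int) : PySem.Int.toChars n ≠ [] := by
  unfold PySem.Int.toChars
  split
  · simp
  · have h0 : 0 < (Nat.toDigits 10 n.toNat).length := Nat.length_toDigits_pos
    intro h; simp [h] at h0

-- 'if p then acc + f else acc' loop = sum of the guarded terms
theorem pvFoldlIfAdd {α : Type} (p : α → Bool) (f : α → Int) (l : List α) (a : Int) :
    l.foldl (fun acc x => if p x then acc + f x else acc) a
      = a + (l.map (fun x => if p x then f x else 0)).sum := by
  induction l generalizing a with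
  | nil => simp
  | cons x t ih => by_cases h : p x = true <;> simp [h, ih] <;> ring

-- indicator sum over a list = count * value
theorem pvSumIndicator (L : List (List Char)) (p : List Char) (c : Int) :
    (L.map (fun s => if s = p then c else 0)).sum = (L.count p : Int) * c := by
  induction L with
  | nil => simp
  | cons x t ih =>
    by_cases h : x = p <;> simp [h, ih] <;> push_cast <;> ring

-- swap a list-sum of Finset-sums
theorem pvSumSwap {α : Type} (L : List α) (m : Nat) (g : α → Nat → Int) :
    (L.map (fun s => ∑ j ∈ Finset.range m, g s j)).sum
      = ∑ j ∈ Finset.range m, (L.map (fun s => g s j)).sum := by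
  induction L with
  | nil => simp
  | cons x t ih => simp [ih, Finset.sum_add_distrib]

-- pyRange 1 n fold-sum as a Finset.range sum
theorem pvPyRangeSum (n : Nat) (k : Int → Int) :
    ((PySem.List.pyRange 1 (n : Int)).map k).sum
      = ∑ j ∈ Finset.range (n - 1), k ((j : Int) + 1) := by
  induction n with
  | zero => simp [show PySem.List.pyRange 1 (0:Int) = [] from rfl]
  | succ n ih =>
    rcases Nat.eq_zero_or_pos n with h0 | h1
    · subst h0; simp [show PySem.List.pyRange 1 (1:Int) = [] from rfl]
    · obtain ⟨p, rfl⟩ : ∃ p, n = p + 1 := ⟨n - 1, by omega⟩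
      rw [show ((p + 1 + 1 : Nat) : Int) = ((p + 1 : Nat) : Int) + 1 by push_cast; ring,
          PySem.List.pyRange_one_succ_right (by exact_mod_cast h1)]
      simp only [List.map_append, List.sum_append, ih]
      rw [show p + 1 + 1 - 1 = p + 1 by omega, Finset.sum_range_succ,
          show p + 1 - 1 = p by omega]
      simp

-- per-element identity: the contribution of one nonempty string s
theorem pvPerElem (L : List (List Char)) (hL : L.count ([] : List Char) = 0)
    (vs s : List Char) (hs : s ≠ []) :
    (if PySem.Chars.startswith vs s then (L.count (vs.drop s.length) : Int) else 0)
      = ∑ j ∈ Finset.range (vs.length - 1),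
          if s = vs.take (j + 1) then (L.count (vs.drop (j + 1)) : Int) else 0 := by
  have h1 : 1 ≤ s.length := List.length_pos_iff.2 hs
  by_cases hsw : PySem.Chars.startswith vs s = true
  · have hpre : s <+: vs := (PySem.Chars.startswith_iff vs s).1 hsw
    have htake : s = vs.take s.length := List.prefix_iff_eq_take.1 hpre
    have hle : s.length ≤ vs.length := hpre.length_le
    rw [if_pos hsw]
    by_cases heq : s.length = vs.length
    · have hdrop : vs.drop s.length = [] := by rw [heq]; simp
      rw [hdrop, hL]
      symm
      apply Finset.sum_eq_zero
      intro j hj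
      rw [if_neg]
      intro hc
      have hlen : s.length = min (j + 1) vs.length := by
        rw [hc, List.length_take]
      have hjb := Finset.mem_range.1 hj
      omega
    · symm
      rw [Finset.sum_eq_single_of_mem (s.length - 1)
            (Finset.mem_range.2 (by omega))
            (by
              intro j hj hne
              rw [if_neg]
              intro hc
              have hlen : s.length = min (j + 1) vs.length := by
                rw [hc, List.length_take]
              have hjb := Finset.mem_range.1 hj
              omega)]
      rw [show s.length - 1 + 1 = s.length by omega, if_pos htake]
  · rw [if_neg hsw]
    symm
    apply Finset.sum_eq_zero
    intro j hj
    rw [if_neg]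
    intro hc
    apply hsw
    rw [PySem.Chars.startswith_iff, hc]
    exact List.take_prefix _ _

theorem count_concat_num_spec : Claim_equal_count_concat_num := by
  intro numbers value _
  unfold Spec_count_concat_num count_concat_num count_concat_num_alt
  have hm : numbers.foldl (fun d n =>
        d.insert (PySem.Int.toChars n) (d.getD (PySem.Int.toChars n) 0 + 1))
        PySem.Dict.empty
      = PySem.Dict.counter (numbers.map PySem.Int.toChars) := by
    rw [← PySem.Dict.foldl_insert_getD_add_one_eq_counter, List.foldl_map]
  simp only [hm]
  set L := numbers.map PySem.Int.toChars with hLdef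
  set vs := PySem.Int.toChars value with hvs
  have hL0 : L.count ([] : List Char) = 0 := by
    rw [List.count_eq_zero]
    intro hmem
    obtain ⟨n, -, h⟩ := List.mem_map.1 hmem
    exact pvToChars_ne_nil n h
  rw [pvFoldlIfAdd, PySem.List.foldl_add]
  simp only [zero_add, PySem.Chars.slice_eq_listSlice, PySem.Chars.len_eq]
  -- A side: re-index the list being summed over by str(n)
  rw [show (numbers.map (fun n =>
        if PySem.Chars.startswith vs (PySem.Int.toChars n) then
          (PySem.Dict.counter L).getD
            (PySem.List.slice vs (some ((PySem.Int.toChars n).length : Int)) none) 0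
        else 0))
      = L.map (fun s =>
        if PySem.Chars.startswith vs s then
          (PySem.Dict.counter L).getD
            (PySem.List.slice vs (some (s.length : Int)) none) 0
        else 0) by rw [hLdef, List.map_map]; rfl]
  -- rewrite counter lookups as counts and slices as drop/take
  have hslice_from : ∀ s : List Char,
      PySem.List.slice vs (some ((s.length : Nat) : Int)) none = vs.drop s.length := by
    intro s
    rw [PySem.List.slice_from vs (by positivity)]
    simp
  calc (L.map (fun s =>
        if PySem.Chars.startswith vs s then
          (PySem.Dict.counter L).getD
            (PySem.List.slice vs (some (s.length : Int)) none) 0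
        else 0)).sum
      = (L.map (fun s =>
          if PySem.Chars.startswith vs s then (L.count (vs.drop s.length) : Int)
          else 0)).sum := by
        apply congrArg
        apply List.map_congr_left
        intro s hsmem
        rw [hslice_from, PySem.Dict.getD_counter]
    _ = (L.map (fun s => ∑ j ∈ Finset.range (vs.length - 1),
          if s = vs.take (j + 1) then (L.count (vs.drop (j + 1)) : Int) else 0)).sum := by
        apply congrArg
        apply List.map_congr_left
        intro s hsmem
        obtain ⟨n, -, rfl⟩ := List.mem_map.1 hsmem
        exact pvPerElem L hL0 vs _ (pvToChars_ne_nil n)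
    _ = ∑ j ∈ Finset.range (vs.length - 1),
          (L.count (vs.take (j + 1)) : Int) * (L.count (vs.drop (j + 1)) : Int) := by
        rw [pvSumSwap]
        apply Finset.sum_congr rfl
        intro j hj
        exact pvSumIndicator L (vs.take (j + 1)) _
    _ = _ := by
        rw [pvPyRangeSum]
        apply Finset.sum_congr rfl
        intro j hj
        rw [show ((j : Int) + 1) = ((j + 1 : Nat) : Int) by push_cast; ring]
        rw [PySem.List.slice_to vs (by positivity), PySem.List.slice_from vs (by positivity)]
        simp [PySem.Dict.getD_counter]
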